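-- pv_equiv track=rewrite | github.com/bafong05/cs195-capstone-project | ai_backend.py | aggregate_time_for_domains
-- ===== SOURCE A (Python) =====
-- from typing import Any, Literal
--
-- INTERNAL_DOMAIN_TERMS = {
--     "unknown",
--     "extensions",
--     "newtab",
--     "new-tab-page",
-- }
--
-- def is_display_domain(domain: Any) -> bool:
--     normalized = str(domain or "").strip().lower()
--     if not normalized or normalized in INTERNAL_DOMAIN_TERMS:
--         return False
--     return not (
--         normalized.startswith("data:") or
--         normalized.startswith("blob:") or
--         normalized.startswith("javascript:") or
--         normalized.startswith("about:") or
--         normalized.startswith("devtools:") or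
--         normalized.startswith("chrome:") or
--         normalized.startswith("chrome-search:")
--     )
--
-- def aggregate_time_for_domains(sessions: list[dict[str, Any]], domains: list[str]) -> int:
--     domain_set = {domain.lower() for domain in domains}
--     total = 0
--     for session in sessions:
--         time_per_domain = session.get("timePerDomain") or {}
--         for domain, ms in time_per_domain.items():
--             if not is_display_domain(domain):
--                 continue
--             if str(domain).lower() in domain_set:
--                 try:
--                     total += int(float(ms or 0))
--                 except (TypeError, ValueError):
--                     continue
--     return total
-- ===== SOURCE B (Python) =====
-- INTERNAL_DOMAIN_TERMS = {
--     "unknown",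
--     "extensions",
--     "newtab",
--     "new-tab-page",
-- }
--
-- def is_display_domain(domain):
--     normalized = str(domain or "").strip().lower()
--     if not normalized or normalized in INTERNAL_DOMAIN_TERMS:
--         return False
--     return not (
--         normalized.startswith("data:") or
--         normalized.startswith("blob:") or
--         normalized.startswith("javascript:") or
--         normalized.startswith("about:") or
--         normalized.startswith("devtools:") or
--         normalized.startswith("chrome:") or
--         normalized.startswith("chrome-search:")
--     )
--
-- def aggregate_time_for_domains(sessions, domains):
--     # Pass 1: aggregate time per lowercased display-domain across all sessions.
--     table = {}
--     for session in sessions: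
--         for domain, ms in (session.get("timePerDomain") or {}).items():
--             if not is_display_domain(domain):
--                 continue
--             try:
--                 val = int(float(ms or 0))
--             except (TypeError, ValueError):
--                 continue
--             key = str(domain).lower()
--             table[key] = table.get(key, 0) + val
--     # Pass 2: resolve the requested domains against the aggregate table.
--     return sum(table.get(d, 0) for d in {domain.lower() for domain in domains})
-- ===== Notes on version B (the rewrite author's own statement) =====
-- stated objective: alternative
-- what changed: B replaces A's filter-inside-the-loop single accumulator with a two-pass aggregate-then-resolve: pass 1 builds a dict mapping every lowercased display-domain to its summed time across all sessions, pass 2 sums the table lookups over the distinct lowercased requested domains.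
import Mathlib
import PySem

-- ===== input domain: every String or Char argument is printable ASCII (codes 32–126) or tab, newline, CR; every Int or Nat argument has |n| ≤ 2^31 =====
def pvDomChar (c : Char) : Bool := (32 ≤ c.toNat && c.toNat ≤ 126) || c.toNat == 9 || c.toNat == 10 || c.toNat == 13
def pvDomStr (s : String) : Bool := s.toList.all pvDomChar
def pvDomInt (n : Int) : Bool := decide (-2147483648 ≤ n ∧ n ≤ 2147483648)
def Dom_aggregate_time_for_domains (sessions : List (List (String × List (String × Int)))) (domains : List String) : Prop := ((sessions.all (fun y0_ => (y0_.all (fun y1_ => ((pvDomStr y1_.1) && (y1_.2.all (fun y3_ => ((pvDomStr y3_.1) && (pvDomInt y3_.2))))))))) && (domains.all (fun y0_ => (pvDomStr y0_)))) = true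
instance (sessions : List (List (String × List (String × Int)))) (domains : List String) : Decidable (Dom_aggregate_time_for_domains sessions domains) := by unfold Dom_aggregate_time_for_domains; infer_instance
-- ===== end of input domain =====

-- B changes the decomposition (aggregate-then-resolve via a per-domain table instead of
-- filtering inside the loop); same asymptotic cost. Proven equal on all inputs in Dom.

-- ===== PORT A =====
def INTERNAL_DOMAIN_TERMS : List String := ["unknown", "extensions", "newtab", "new-tab-page"]

-- str(domain or "") on a str equals domain (empty stays empty); exact on strings.
def is_display_domain (domain : String) : Bool :=
  let normalized := PySem.Str.lower (PySem.Str.strip domain)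
  if normalized == "" || INTERNAL_DOMAIN_TERMS.contains normalized then false
  else !(PySem.Str.startswith normalized "data:" ||
         PySem.Str.startswith normalized "blob:" ||
         PySem.Str.startswith normalized "javascript:" ||
         PySem.Str.startswith normalized "about:" ||
         PySem.Str.startswith normalized "devtools:" ||
         PySem.Str.startswith normalized "chrome:" ||
         PySem.Str.startswith normalized "chrome-search:")

-- session.get("timePerDomain") or {} — a missing key and a falsy (empty) value both give {};
-- ms is an int here, so 'ms or 0' is ms and int(float(ms)) = ms exactly (|ms| ≤ 2^31 < 2^53),
-- and the try/except can never fire on an int.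
def aggregate_time_for_domains (sessions : List (List (String × List (String × Int)))) (domains : List String) : Int :=
  let domain_set := PySem.Set.ofList (domains.map PySem.Str.lower)
  sessions.foldl (fun total session =>
    let time_per_domain := (PySem.Dict.ofList session).getD "timePerDomain" []
    (PySem.Dict.ofList time_per_domain).items.foldl (fun total p =>
      if !is_display_domain p.1 then total
      else if domain_set.contains (PySem.Str.lower p.1) then total + p.2
      else total) total) 0

-- ===== PORT B =====
def aggregate_time_for_domains_alt (sessions : List (List (String × List (String × Int)))) (domains : List String) : Int :=
  -- Pass 1: aggregate time per lowercased display-domain across all sessions.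
  let table : PySem.Dict String Int := sessions.foldl (fun table session =>
    (PySem.Dict.ofList ((PySem.Dict.ofList session).getD "timePerDomain" [])).items.foldl
      (fun table p =>
        if !is_display_domain p.1 then table
        else
          let key := PySem.Str.lower p.1
          table.insert key (table.getD key 0 + p.2)) table) PySem.Dict.empty
  -- Pass 2: resolve the requested domains against the aggregate table.
  (PySem.Set.ofList (domains.map PySem.Str.lower)).foldl (fun acc d => acc + table.getD d 0) 0

-- ===== PRECONDITION & SPEC =====
def Spec_aggregate_time_for_domains (sessions : List (List (String × List (String × Int)))) (domains : List String) (out : Int) : Prop := out = aggregate_time_for_domains_alt sessions domains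
instance (sessions : List (List (String × List (String × Int)))) (domains : List String) (out : Int) : Decidable (Spec_aggregate_time_for_domains sessions domains out) := by unfold Spec_aggregate_time_for_domains; infer_instance

-- ===== CLAIM (what is proved, stated in full; the proofs are below) =====
def Claim_equal_aggregate_time_for_domains : Prop := ∀ (sessions : List (List (String × List (String × Int)))) (domains : List String), Dom_aggregate_time_for_domains sessions domains → Spec_aggregate_time_for_domains sessions domains (aggregate_time_for_domains sessions domains)

-- ===== LEMMAS AND PROOFS =====

-- the flat list of contributing entries: lowercased display-domain keys paired with their ms values
def pvEntries (sessions : List (List (String × List (String × Int)))) : List (String × Int) :=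
  sessions.flatMap (fun session =>
    ((PySem.Dict.ofList ((PySem.Dict.ofList session).getD "timePerDomain" [])).items.filter
      (fun p => is_display_domain p.1)).map (fun p => (PySem.Str.lower p.1, p.2)))

-- A's inner item loop, flattened onto the filtered-and-lowered entry list
theorem pvA_inner (S : List String) (items : List (String × Int)) (t : Int) :
    items.foldl (fun total p =>
      if !is_display_domain p.1 then total
      else if S.contains (PySem.Str.lower p.1) then total + p.2
      else total) t
    = ((items.filter (fun p => is_display_domain p.1)).map
        (fun p => (PySem.Str.lower p.1, p.2))).foldl
        (fun total p => if S.contains p.1 then total + p.2 else total) t := by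
  induction items generalizing t with
  | nil => simp
  | cons p rest ih =>
    cases h : is_display_domain p.1 <;> simp [h] <;> simpa using ih _

-- A as a single fold over pvEntries
theorem pvA_shape (sessions : List (List (String × List (String × Int)))) (S : List String) (t : Int) :
    sessions.foldl (fun total session =>
      ((PySem.Dict.ofList ((PySem.Dict.ofList session).getD "timePerDomain" [])).items).foldl
        (fun total p =>
          if !is_display_domain p.1 then total
          else if S.contains (PySem.Str.lower p.1) then total + p.2
          else total) total) t
    = (pvEntries sessions).foldl
        (fun total p => if S.contains p.1 then total + p.2 else total) t := by
  induction sessions generalizing t with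
  | nil => simp [pvEntries]
  | cons s rest ih =>
    rw [List.foldl_cons, pvA_inner, ih]
    simp only [pvEntries, List.flatMap_cons, List.foldl_append]

-- B's inner item loop, flattened the same way
theorem pvB_inner (items : List (String × Int)) (d : PySem.Dict String Int) :
    items.foldl (fun table p =>
      if !is_display_domain p.1 then table
      else table.insert (PySem.Str.lower p.1) (table.getD (PySem.Str.lower p.1) 0 + p.2)) d
    = ((items.filter (fun p => is_display_domain p.1)).map
        (fun p => (PySem.Str.lower p.1, p.2))).foldl
        (fun table p => table.insert p.1 (table.getD p.1 0 + p.2)) d := by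
  induction items generalizing d with
  | nil => simp
  | cons p rest ih =>
    cases h : is_display_domain p.1 <;> simp [h] <;> simpa using ih _

-- B's table as a single fold over pvEntries
theorem pvB_shape (sessions : List (List (String × List (String × Int)))) (d : PySem.Dict String Int) :
    sessions.foldl (fun table session =>
      ((PySem.Dict.ofList ((PySem.Dict.ofList session).getD "timePerDomain" [])).items).foldl
        (fun table p =>
          if !is_display_domain p.1 then table
          else table.insert (PySem.Str.lower p.1) (table.getD (PySem.Str.lower p.1) 0 + p.2)) table) d
    = (pvEntries sessions).foldl
        (fun table p => table.insert p.1 (table.getD p.1 0 + p.2)) d := by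
  induction sessions generalizing d with
  | nil => simp [pvEntries]
  | cons s rest ih =>
    rw [List.foldl_cons, pvB_inner, ih]
    simp only [pvEntries, List.flatMap_cons, List.foldl_append]

-- the membership-guarded accumulation is the sum of the matching values
theorem pvFoldl_if_sum (c : String → Bool) (E : List (String × Int)) (t : Int) :
    E.foldl (fun total p => if c p.1 then total + p.2 else total) t
    = t + ((E.filter (fun p => c p.1)).map (fun p => p.2)).sum := by
  induction E generalizing t with
  | nil => simp
  | cons p rest ih =>
    cases h : c p.1 <;> simp [h, ih] <;> omega

-- the aggregated table holds, at each key, the sum of that key's values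
theorem pvTable_getD (E : List (String × Int)) (d : PySem.Dict String Int) (k : String) :
    (E.foldl (fun table p => table.insert p.1 (table.getD p.1 0 + p.2)) d).getD k 0
    = d.getD k 0 + ((E.filter (fun p => p.1 == k)).map (fun p => p.2)).sum := by
  induction E generalizing d with
  | nil => simp
  | cons p rest ih =>
    by_cases h : p.1 = k
    · subst h
      simp [ih, PySem.Dict.getD_insert_self]
      omega
    · have h' : (p.1 == k) = false := by simp [h]
      rw [List.foldl_cons, ih, PySem.Dict.getD_insert_of_ne _ _ _ (fun e => h e.symm),
        List.filter_cons]
      simp [h']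

-- splitting a filter over two disjoint boolean conditions
theorem pvSplit_sum (E : List (String × Int)) (c1 c2 : String → Bool)
    (hdisj : ∀ x, c1 x = true → c2 x = false) :
    ((E.filter (fun p => c1 p.1 || c2 p.1)).map (fun p => p.2)).sum
    = ((E.filter (fun p => c1 p.1)).map (fun p => p.2)).sum
      + ((E.filter (fun p => c2 p.1)).map (fun p => p.2)).sum := by
  induction E with
  | nil => simp
  | cons p rest ih =>
    cases h1 : c1 p.1
    · cases h2 : c2 p.1 <;> simp [h1, h2, ih] <;> omega
    · have h2 : c2 p.1 = false := hdisj _ h1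
      simp [h1, h2, ih]
      omega

-- resolving a duplicate-free key list against per-key sums = one guarded pass over the entries
theorem pvResolve (E : List (String × Int)) (S : List String) (hS : S.Nodup) (t : Int) :
    S.foldl (fun acc d => acc + ((E.filter (fun p => p.1 == d)).map (fun p => p.2)).sum) t
    = t + ((E.filter (fun p => S.contains p.1)).map (fun p => p.2)).sum := by
  induction S generalizing t with
  | nil => simp
  | cons d S' ih =>
    have hd : d ∉ S' := (List.nodup_cons.mp hS).1
    have hS' : S'.Nodup := (List.nodup_cons.mp hS).2
    rw [List.foldl_cons, ih hS']
    have hcontains : (fun p : String × Int => (d :: S').contains p.1)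
        = fun p => (p.1 == d) || S'.contains p.1 := by
      funext p
      exact List.contains_cons
    have hdisj : ∀ x, (x == d) = true → S'.contains x = false := by
      intro x hx
      have : x = d := by simpa using hx
      subst this
      simpa using hd
    rw [hcontains, pvSplit_sum E _ _ hdisj]
    omega

-- ===== VERDICT (by name: the statement is the Claim_ definition above) =====
theorem aggregate_time_for_domains_spec : Claim_equal_aggregate_time_for_domains := by
  intro sessions domains _
  unfold Spec_aggregate_time_for_domains aggregate_time_for_domains aggregate_time_for_domains_alt
  dsimp only
  simp only [PySem.Set.contains]
  have htable :
      (PySem.Set.ofList (domains.map PySem.Str.lower)).foldl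
        (fun acc d =>
          acc + ((pvEntries sessions).foldl
            (fun table p => table.insert p.1 (table.getD p.1 0 + p.2)) PySem.Dict.empty).getD d 0) 0
      = (PySem.Set.ofList (domains.map PySem.Str.lower)).foldl
        (fun acc d => acc + (((pvEntries sessions).filter (fun p => p.1 == d)).map (fun p => p.2)).sum) 0 := by
    apply PySem.List.foldl_congr_mem
    intro acc d _
    rw [pvTable_getD]
    simp
  refine Eq.trans (pvA_shape sessions (PySem.Set.ofList (domains.map PySem.Str.lower)) 0) ?_
  refine Eq.trans (pvFoldl_if_sum _ (pvEntries sessions) 0) ?_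
  refine Eq.symm ?_
  refine Eq.trans (congrArg (fun T : PySem.Dict String Int =>
      (PySem.Set.ofList (domains.map PySem.Str.lower)).foldl (fun acc d => acc + T.getD d 0) 0)
      (pvB_shape sessions PySem.Dict.empty)) ?_
  refine Eq.trans htable ?_
  exact pvResolve (pvEntries sessions) _ (PySem.Set.nodup_ofList _) 0
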